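-- pv_equiv track=rewrite | github.com/Fas96/AlgoSolution | 1511-count-number-of-teams/1511-count-number-of-teams.py | numTeams
-- ===== SOURCE A (Python) =====
-- from typing import List
--
-- def numTeams(rating: List[int]) -> int:
--     n=len(rating)
--     res = 0
--     for i in range(1, n - 1):
--         less = [0, 0]
--         greater = [0, 0]
--         for j in range(n):
--             if rating[i] < rating[j]:
--                 less[1 if j > i else 0] += 1
--             if rating[i] > rating[j]:
--                 greater[1 if j > i else 0] += 1
--         res += less[0] * greater[1] + greater[0] * less[1]
--     return res
-- ===== SOURCE B (Python) =====
-- from typing import List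
--
-- def numTeams(rating: List[int]) -> int:
--     # Direct triple enumeration grouped by the middle soldier.
--     n = len(rating)
--     return sum(
--         1
--         for j in range(n)
--         for i in range(j)
--         for k in range(j + 1, n)
--         if rating[i] < rating[j] < rating[k] or rating[i] > rating[j] > rating[k]
--     )
-- ===== Notes on version B (the rewrite author's own statement) =====
-- stated objective: simpler
-- what changed: Replaces A's per-middle counter arrays (four counters maintained over a full inner scan, then combined by products) with a single comprehension that enumerates every triple i<j<k and tests monotonicity directly.
import Mathlib
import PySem

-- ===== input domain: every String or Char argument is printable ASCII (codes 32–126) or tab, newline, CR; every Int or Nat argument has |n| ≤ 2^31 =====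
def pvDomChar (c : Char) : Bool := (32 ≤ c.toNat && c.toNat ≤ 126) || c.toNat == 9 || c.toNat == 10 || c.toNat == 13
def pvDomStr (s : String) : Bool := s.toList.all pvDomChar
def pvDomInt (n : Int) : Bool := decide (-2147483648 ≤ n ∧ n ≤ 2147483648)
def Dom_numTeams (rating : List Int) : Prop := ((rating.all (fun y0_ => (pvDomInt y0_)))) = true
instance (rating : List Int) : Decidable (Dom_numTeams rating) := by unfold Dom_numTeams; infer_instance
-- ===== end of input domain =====

-- B replaces A's per-middle counter arrays (four counters over a full inner scan, combined by
-- products) with a plain enumeration of all triples i<j<k; objective: simpler, not faster.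

-- ===== PORT A =====
-- inner-loop body of A: updates the [less0, less1] and [greater0, greater1] counters for index j
def stepA (rating : List Int) (i : Int) (st : (Int × Int) × (Int × Int)) (j : Int) :
    (Int × Int) × (Int × Int) :=
  let ri := PySem.List.pyGetD rating i 0
  let rj := PySem.List.pyGetD rating j 0
  let less := if ri < rj then (if i < j then (st.1.1, st.1.2 + 1) else (st.1.1 + 1, st.1.2)) else st.1
  let greater := if ri > rj then (if i < j then (st.2.1, st.2.2 + 1) else (st.2.1 + 1, st.2.2)) else st.2
  (less, greater)

def numTeams (rating : List Int) : Int :=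
  let n : Int := rating.length
  (PySem.List.pyRange 1 (n - 1) 1).foldl (fun res i =>
    let lg := (PySem.List.pyRange 0 n 1).foldl (stepA rating i) ((0, 0), (0, 0))
    res + lg.1.1 * lg.2.2 + lg.2.1 * lg.1.2) 0

-- ===== PORT B =====
def numTeams_alt (rating : List Int) : Int :=
  let n : Int := rating.length
  (PySem.List.pyRange 0 n 1).foldl (fun acc j =>
    (PySem.List.pyRange 0 j 1).foldl (fun acc i =>
      (PySem.List.pyRange (j + 1) n 1).foldl (fun acc k =>
        let ri := PySem.List.pyGetD rating i 0
        let rj := PySem.List.pyGetD rating j 0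
        let rk := PySem.List.pyGetD rating k 0
        if (ri < rj ∧ rj < rk) ∨ (ri > rj ∧ rj > rk) then acc + 1 else acc) acc) acc) 0

-- ===== PRECONDITION & SPEC =====
def Spec_numTeams (rating : List Int) (out : Int) : Prop := out = numTeams_alt rating
instance (rating : List Int) (out : Int) : Decidable (Spec_numTeams rating out) := by unfold Spec_numTeams; infer_instance

-- ===== CLAIM (what is proved, stated in full; the proofs are below) =====
def Claim_equal_numTeams : Prop := ∀ (rating : List Int), Dom_numTeams rating → Spec_numTeams rating (numTeams rating)

-- ===== LEMMAS AND PROOFS =====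

-- number of positions i in [a,b) with rating[i] < rating[m] (resp. >)
def cLt (r : List Int) (m a b : Int) : Int :=
  ((PySem.List.pyRange a b 1).map (fun i =>
    if PySem.List.pyGetD r i 0 < PySem.List.pyGetD r m 0 then (1 : Int) else 0)).sum
def cGt (r : List Int) (m a b : Int) : Int :=
  ((PySem.List.pyRange a b 1).map (fun i =>
    if PySem.List.pyGetD r m 0 < PySem.List.pyGetD r i 0 then (1 : Int) else 0)).sum

-- the common per-middle value (number of teams with middle index m)
def termT (r : List Int) (n m : Int) : Int :=
  cGt r m 0 m * cLt r m (m + 1) n + cLt r m 0 m * cGt r m (m + 1) n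

-- the four per-element contributions of A's inner loop (less0, less1, greater0, greater1)
def fA0 (r : List Int) (i j : Int) : Int :=
  if PySem.List.pyGetD r i 0 < PySem.List.pyGetD r j 0 then (if i < j then 0 else 1) else 0
def fA1 (r : List Int) (i j : Int) : Int :=
  if PySem.List.pyGetD r i 0 < PySem.List.pyGetD r j 0 then (if i < j then 1 else 0) else 0
def fA2 (r : List Int) (i j : Int) : Int :=
  if PySem.List.pyGetD r j 0 < PySem.List.pyGetD r i 0 then (if i < j then 0 else 1) else 0
def fA3 (r : List Int) (i j : Int) : Int :=
  if PySem.List.pyGetD r j 0 < PySem.List.pyGetD r i 0 then (if i < j then 1 else 0) else 0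

lemma foldl_stepA (r : List Int) (i : Int) (L : List Int) (st : (Int × Int) × (Int × Int)) :
    L.foldl (stepA r i) st =
      ((st.1.1 + (L.map (fA0 r i)).sum, st.1.2 + (L.map (fA1 r i)).sum),
       (st.2.1 + (L.map (fA2 r i)).sum, st.2.2 + (L.map (fA3 r i)).sum)) := by
  induction L generalizing st with
  | nil => simp
  | cons x L ih =>
    rw [List.foldl_cons, ih]
    simp only [stepA, fA0, fA1, fA2, fA3, List.map_cons, List.sum_cons]
    split_ifs <;> simp <;> ring_nf <;> simp

-- evaluating A's four sums over the full range at a middle index m, 0 ≤ m < n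
lemma sum_fA0 (r : List Int) (n m : Int) (h0 : 0 ≤ m) (h1 : m < n) :
    ((PySem.List.pyRange 0 n 1).map (fA0 r m)).sum = cGt r m 0 m := by
  rw [PySem.List.pyRange_one_append 0 m n h0 (le_of_lt h1), PySem.List.pyRange_one_cons h1]
  rw [List.map_append, List.sum_append, List.map_cons, List.sum_cons]
  have h2 : ((PySem.List.pyRange 0 m 1).map (fA0 r m))
      = (PySem.List.pyRange 0 m 1).map (fun i =>
          if PySem.List.pyGetD r m 0 < PySem.List.pyGetD r i 0 then (1:Int) else 0) := by
    apply List.map_congr_left; intro j hj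
    rw [PySem.List.mem_pyRange_one] at hj
    simp [fA0, show ¬ m < j by omega]
  have h3 : ((PySem.List.pyRange (m+1) n 1).map (fA0 r m))
      = (PySem.List.pyRange (m+1) n 1).map (fun _ => (0:Int)) := by
    apply List.map_congr_left; intro j hj
    rw [PySem.List.mem_pyRange_one] at hj
    simp [fA0, show m < j by omega]
  rw [h2, h3]
  simp [fA0, cGt]

lemma sum_fA1 (r : List Int) (n m : Int) (h0 : 0 ≤ m) (h1 : m < n) :
    ((PySem.List.pyRange 0 n 1).map (fA1 r m)).sum = cGt r m (m + 1) n := by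
  rw [PySem.List.pyRange_one_append 0 m n h0 (le_of_lt h1), PySem.List.pyRange_one_cons h1]
  rw [List.map_append, List.sum_append, List.map_cons, List.sum_cons]
  have h2 : ((PySem.List.pyRange 0 m 1).map (fA1 r m))
      = (PySem.List.pyRange 0 m 1).map (fun _ => (0:Int)) := by
    apply List.map_congr_left; intro j hj
    rw [PySem.List.mem_pyRange_one] at hj
    simp [fA1, show ¬ m < j by omega]
  have h3 : ((PySem.List.pyRange (m+1) n 1).map (fA1 r m))
      = (PySem.List.pyRange (m+1) n 1).map (fun i =>
          if PySem.List.pyGetD r m 0 < PySem.List.pyGetD r i 0 then (1:Int) else 0) := by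
    apply List.map_congr_left; intro j hj
    rw [PySem.List.mem_pyRange_one] at hj
    simp [fA1, show m < j by omega]
  rw [h2, h3]
  simp [fA1, cGt]

lemma sum_fA2 (r : List Int) (n m : Int) (h0 : 0 ≤ m) (h1 : m < n) :
    ((PySem.List.pyRange 0 n 1).map (fA2 r m)).sum = cLt r m 0 m := by
  rw [PySem.List.pyRange_one_append 0 m n h0 (le_of_lt h1), PySem.List.pyRange_one_cons h1]
  rw [List.map_append, List.sum_append, List.map_cons, List.sum_cons]
  have h2 : ((PySem.List.pyRange 0 m 1).map (fA2 r m))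
      = (PySem.List.pyRange 0 m 1).map (fun i =>
          if PySem.List.pyGetD r i 0 < PySem.List.pyGetD r m 0 then (1:Int) else 0) := by
    apply List.map_congr_left; intro j hj
    rw [PySem.List.mem_pyRange_one] at hj
    simp [fA2, show ¬ m < j by omega]
  have h3 : ((PySem.List.pyRange (m+1) n 1).map (fA2 r m))
      = (PySem.List.pyRange (m+1) n 1).map (fun _ => (0:Int)) := by
    apply List.map_congr_left; intro j hj
    rw [PySem.List.mem_pyRange_one] at hj
    simp [fA2, show m < j by omega]
  rw [h2, h3]
  simp [fA2, cLt]

lemma sum_fA3 (r : List Int) (n m : Int) (h0 : 0 ≤ m) (h1 : m < n) :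
    ((PySem.List.pyRange 0 n 1).map (fA3 r m)).sum = cLt r m (m + 1) n := by
  rw [PySem.List.pyRange_one_append 0 m n h0 (le_of_lt h1), PySem.List.pyRange_one_cons h1]
  rw [List.map_append, List.sum_append, List.map_cons, List.sum_cons]
  have h2 : ((PySem.List.pyRange 0 m 1).map (fA3 r m))
      = (PySem.List.pyRange 0 m 1).map (fun _ => (0:Int)) := by
    apply List.map_congr_left; intro j hj
    rw [PySem.List.mem_pyRange_one] at hj
    simp [fA3, show ¬ m < j by omega]
  have h3 : ((PySem.List.pyRange (m+1) n 1).map (fA3 r m))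
      = (PySem.List.pyRange (m+1) n 1).map (fun i =>
          if PySem.List.pyGetD r i 0 < PySem.List.pyGetD r m 0 then (1:Int) else 0) := by
    apply List.map_congr_left; intro j hj
    rw [PySem.List.mem_pyRange_one] at hj
    simp [fA3, show m < j by omega]
  rw [h2, h3]
  simp [fA3, cLt]

-- B's innermost loop at middle j, left index i
lemma innermost_B (r : List Int) (n j i acc : Int) :
    (PySem.List.pyRange (j + 1) n 1).foldl (fun acc k =>
        let ri := PySem.List.pyGetD r i 0
        let rj := PySem.List.pyGetD r j 0
        let rk := PySem.List.pyGetD r k 0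
        if (ri < rj ∧ rj < rk) ∨ (ri > rj ∧ rj > rk) then acc + 1 else acc) acc
    = acc + (if PySem.List.pyGetD r i 0 < PySem.List.pyGetD r j 0 then (1:Int) else 0) * cGt r j (j+1) n
          + (if PySem.List.pyGetD r j 0 < PySem.List.pyGetD r i 0 then (1:Int) else 0) * cLt r j (j+1) n := by
  have hfun : (fun (acc k : Int) =>
        let ri := PySem.List.pyGetD r i 0
        let rj := PySem.List.pyGetD r j 0
        let rk := PySem.List.pyGetD r k 0
        if (ri < rj ∧ rj < rk) ∨ (ri > rj ∧ rj > rk) then acc + 1 else acc)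
      = (fun acc k => acc + if (PySem.List.pyGetD r i 0 < PySem.List.pyGetD r j 0 ∧ PySem.List.pyGetD r j 0 < PySem.List.pyGetD r k 0) ∨ (PySem.List.pyGetD r i 0 > PySem.List.pyGetD r j 0 ∧ PySem.List.pyGetD r j 0 > PySem.List.pyGetD r k 0) then (1:Int) else 0) := by
    funext a k
    by_cases h : (PySem.List.pyGetD r i 0 < PySem.List.pyGetD r j 0 ∧ PySem.List.pyGetD r j 0 < PySem.List.pyGetD r k 0) ∨ (PySem.List.pyGetD r i 0 > PySem.List.pyGetD r j 0 ∧ PySem.List.pyGetD r j 0 > PySem.List.pyGetD r k 0) <;> simp [h]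
  rw [hfun, PySem.List.foldl_add]
  rcases lt_trichotomy (PySem.List.pyGetD r i 0) (PySem.List.pyGetD r j 0) with h | h | h
  · rw [List.map_congr_left (g := fun k => if PySem.List.pyGetD r j 0 < PySem.List.pyGetD r k 0 then (1:Int) else 0)
      (fun k _ => by simp [h, show ¬ PySem.List.pyGetD r i 0 > PySem.List.pyGetD r j 0 by omega])]
    simp [cGt, h, show ¬ PySem.List.pyGetD r j 0 < PySem.List.pyGetD r i 0 by omega]
  · rw [List.map_congr_left (g := fun _ => (0:Int)) (fun k _ => by simp [h])]
    simp [h]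
  · rw [List.map_congr_left (g := fun k => if PySem.List.pyGetD r k 0 < PySem.List.pyGetD r j 0 then (1:Int) else 0)
      (fun k _ => by simp [show ¬ PySem.List.pyGetD r i 0 < PySem.List.pyGetD r j 0 by omega, h, GT.gt])]
    simp [cLt, h, show ¬ PySem.List.pyGetD r i 0 < PySem.List.pyGetD r j 0 by omega]

-- B's two inner loops at middle j compute termT
lemma inner_B (r : List Int) (n j acc : Int) :
    (PySem.List.pyRange 0 j 1).foldl (fun acc i =>
      (PySem.List.pyRange (j + 1) n 1).foldl (fun acc k =>
        let ri := PySem.List.pyGetD r i 0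
        let rj := PySem.List.pyGetD r j 0
        let rk := PySem.List.pyGetD r k 0
        if (ri < rj ∧ rj < rk) ∨ (ri > rj ∧ rj > rk) then acc + 1 else acc) acc) acc
    = acc + termT r n j := by
  have hfun : (fun (acc i : Int) =>
      (PySem.List.pyRange (j + 1) n 1).foldl (fun acc k =>
        let ri := PySem.List.pyGetD r i 0
        let rj := PySem.List.pyGetD r j 0
        let rk := PySem.List.pyGetD r k 0
        if (ri < rj ∧ rj < rk) ∨ (ri > rj ∧ rj > rk) then acc + 1 else acc) acc)
    = (fun acc i => acc + ((if PySem.List.pyGetD r i 0 < PySem.List.pyGetD r j 0 then (1:Int) else 0) * cGt r j (j+1) n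
          + (if PySem.List.pyGetD r j 0 < PySem.List.pyGetD r i 0 then (1:Int) else 0) * cLt r j (j+1) n)) := by
    funext a i; rw [innermost_B]; ring
  rw [hfun, PySem.List.foldl_add, PySem.List.sum_map_add_int, List.sum_map_mul_right, List.sum_map_mul_right]
  show acc + ((cLt r j 0 j) * cGt r j (j+1) n + (cGt r j 0 j) * cLt r j (j+1) n) = _
  rw [termT]; ring

lemma termT_left (r : List Int) (n : Int) : termT r n 0 = 0 := by
  simp [termT, cGt, cLt, PySem.List.pyRange_one_eq_nil (le_refl (0:Int))]

lemma termT_right (r : List Int) (n : Int) : termT r n (n - 1) = 0 := by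
  simp [termT, cGt, cLt]

lemma sum_ranges (r : List Int) (n : Int) (hn : 0 ≤ n) :
    ((PySem.List.pyRange 1 (n - 1) 1).map (termT r n)).sum
      = ((PySem.List.pyRange 0 n 1).map (termT r n)).sum := by
  by_cases h2 : 2 ≤ n
  · rw [PySem.List.pyRange_one_cons (show (0:Int) < n by omega),
      show (0:Int) + 1 = 1 by norm_num]
    rw [show PySem.List.pyRange 1 n = PySem.List.pyRange 1 (n - 1) ++ [n - 1] from by
      conv_lhs => rw [show n = (n - 1) + 1 by ring]
      exact PySem.List.pyRange_one_succ_right (by omega)]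
    simp [termT_left, termT_right]
  · have : n = 0 ∨ n = 1 := by omega
    rcases this with h | h <;> subst h
    · simp [PySem.List.pyRange_one_eq_nil]
    · rw [PySem.List.pyRange_one_eq_nil (show (1:Int) - 1 ≤ 1 by norm_num),
        PySem.List.pyRange_one_cons (show (0:Int) < 1 by norm_num),
        PySem.List.pyRange_one_eq_nil (show (1:Int) ≤ 0 + 1 by norm_num)]
      simp [termT_left]

lemma numTeams_eq_sum (rating : List Int) :
    numTeams rating
      = ((PySem.List.pyRange 1 ((rating.length : Int) - 1) 1).map
          (termT rating (rating.length : Int))).sum := by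
  unfold numTeams
  rw [PySem.List.foldl_congr_mem _ _
      (fun res i => res + termT rating (rating.length : Int) i) 0 ?_]
  · rw [PySem.List.foldl_add]; simp
  · intro acc x hx
    rw [PySem.List.mem_pyRange_one] at hx
    have hx0 : (0 : Int) ≤ x := by omega
    have hx1 : x < (rating.length : Int) := by omega
    simp only [foldl_stepA, sum_fA0 rating _ x hx0 hx1, sum_fA1 rating _ x hx0 hx1,
      sum_fA2 rating _ x hx0 hx1, sum_fA3 rating _ x hx0 hx1, termT]
    ring

lemma numTeams_alt_eq_sum (rating : List Int) :
    numTeams_alt rating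
      = ((PySem.List.pyRange 0 (rating.length : Int) 1).map
          (termT rating (rating.length : Int))).sum := by
  unfold numTeams_alt
  rw [PySem.List.foldl_congr_mem _ _
      (fun acc j => acc + termT rating (rating.length : Int) j) 0
      (fun acc x _ => inner_B rating (rating.length : Int) x acc)]
  rw [PySem.List.foldl_add]; simp

-- ===== VERDICT (by name: the statement is the Claim_ definition above) =====
theorem numTeams_spec : Claim_equal_numTeams := by
  intro rating _
  unfold Spec_numTeams
  rw [numTeams_eq_sum, numTeams_alt_eq_sum,
    sum_ranges rating (rating.length : Int) (by positivity)]
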